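-- pv_equiv track=rewrite | github.com/catoncat/vox-cli | src/vox_cli/services/dictation_ui_service.py | strip_managed_dictation_ui_sections
-- ===== SOURCE A (Python) =====
-- _MANAGED_HEADERS = {
--     '[dictation.transforms]',
--     '[dictation.llm]',
--     '[dictation.context]',
--     '[dictation.hotwords]',
--     '[[dictation.hotwords.entries]]',
--     '[dictation.hints]',
-- }
--
-- def strip_managed_dictation_ui_sections(text: str) -> str:
--     lines = text.splitlines()
--     kept: list[str] = []
--     skipping = False
--
--     for line in lines:
--         stripped = line.strip()
--         is_header = stripped.startswith('[') and stripped.endswith(']')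
--         if is_header:
--             if stripped in _MANAGED_HEADERS:
--                 skipping = True
--                 while kept and not kept[-1].strip():
--                     kept.pop()
--                 continue
--             if skipping:
--                 skipping = False
--         if skipping:
--             continue
--         kept.append(line)
--
--     while kept and not kept[-1].strip():
--         kept.pop()
--     return '\n'.join(kept)
-- ===== SOURCE B (Python) =====
-- _MANAGED_HEADERS = {
--     '[dictation.transforms]',
--     '[dictation.llm]',
--     '[dictation.context]',
--     '[dictation.hotwords]',
--     '[[dictation.hotwords.entries]]',
--     '[dictation.hints]',
-- }
--
-- def strip_managed_dictation_ui_sections(text: str) -> str: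
--     # Segment the lines: a preamble segment, then one segment per header line.
--     segments = []  # (stripped header or None, lines of the segment)
--     header, seg_lines = None, []
--     for line in text.splitlines():
--         stripped = line.strip()
--         if stripped.startswith('[') and stripped.endswith(']'):
--             segments.append((header, seg_lines))
--             header, seg_lines = stripped, [line]
--         else:
--             seg_lines.append(line)
--     segments.append((header, seg_lines))
--
--     out = []
--     for header, seg_lines in segments:
--         if header in _MANAGED_HEADERS:
--             while out and not out[-1].strip():
--                 out.pop()
--         else:
--             out.extend(seg_lines)
--     while out and not out[-1].strip():
--         out.pop()
--     return '\n'.join(out)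
-- ===== Notes on version B (the rewrite author's own statement) =====
-- stated objective: alternative
-- what changed: Replaces A's single line-by-line loop with a skipping flag by a two-phase decomposition: first split the lines into header-delimited segments, then fold over the segments, dropping managed ones (trimming trailing blanks) and appending the rest.
import Mathlib
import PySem

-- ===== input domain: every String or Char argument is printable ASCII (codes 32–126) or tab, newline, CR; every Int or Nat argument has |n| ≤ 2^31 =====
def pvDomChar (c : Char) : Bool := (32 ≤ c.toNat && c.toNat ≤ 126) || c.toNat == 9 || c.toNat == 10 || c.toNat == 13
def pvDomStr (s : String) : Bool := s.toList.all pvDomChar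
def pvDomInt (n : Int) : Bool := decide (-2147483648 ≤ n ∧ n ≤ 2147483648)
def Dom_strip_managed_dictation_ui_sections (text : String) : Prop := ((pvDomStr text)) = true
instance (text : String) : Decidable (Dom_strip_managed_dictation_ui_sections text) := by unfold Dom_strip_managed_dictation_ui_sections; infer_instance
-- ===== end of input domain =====

-- B re-decomposes A's line-by-line skip-flag loop as segmentation into header-delimited
-- segments followed by a fold that drops managed segments (objective: alternative decomposition).

-- ===== PORT A =====
def pvManagedHeaders : List String :=
  ["[dictation.transforms]", "[dictation.llm]", "[dictation.context]",
   "[dictation.hotwords]", "[[dictation.hotwords.entries]]", "[dictation.hints]"]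

-- `while kept and not kept[-1].strip(): kept.pop()`
def pvTrim (kept : List String) : List String :=
  (kept.reverse.dropWhile (fun l => PySem.Str.strip l == "")).reverse

def stepA (st : List String × Bool) (line : String) : List String × Bool :=
  if PySem.Str.startswith (PySem.Str.strip line) "[" &&
     PySem.Str.endswith (PySem.Str.strip line) "]" then
    if pvManagedHeaders.contains (PySem.Str.strip line) then (pvTrim st.1, true)
    else (st.1 ++ [line], false)
  else if st.2 then st
  else (st.1 ++ [line], st.2)

def strip_managed_dictation_ui_sections (text : String) : String :=
  PySem.Str.join "\n" (pvTrim ((PySem.Str.splitlines text).foldl stepA ([], false)).1)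

-- ===== PORT B =====
def pvManagedOpt : Option String → Bool
  | some s => pvManagedHeaders.contains s
  | none => false

-- segment builder: state = (finished segments, current segment)
def stepS (st : List (Option String × List String) × (Option String × List String))
    (line : String) : List (Option String × List String) × (Option String × List String) :=
  if PySem.Str.startswith (PySem.Str.strip line) "[" &&
     PySem.Str.endswith (PySem.Str.strip line) "]" then
    (st.1 ++ [st.2], (some (PySem.Str.strip line), [line]))
  else (st.1, (st.2.1, st.2.2 ++ [line]))

def stepB (out : List String) (seg : Option String × List String) : List String :=
  if pvManagedOpt seg.1 then pvTrim out else out ++ seg.2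

def strip_managed_dictation_ui_sections_alt (text : String) : String :=
  let st := (PySem.Str.splitlines text).foldl stepS ([], (none, []))
  PySem.Str.join "\n" (pvTrim ((st.1 ++ [st.2]).foldl stepB []))

-- ===== PRECONDITION & SPEC =====
def Spec_strip_managed_dictation_ui_sections (text : String) (out : String) : Prop := out = strip_managed_dictation_ui_sections_alt text
instance (text : String) (out : String) : Decidable (Spec_strip_managed_dictation_ui_sections text out) := by unfold Spec_strip_managed_dictation_ui_sections; infer_instance

-- ===== CLAIM (what is proved, stated in full; the proofs are below) =====
def Claim_equal_strip_managed_dictation_ui_sections : Prop := ∀ (text : String), Dom_strip_managed_dictation_ui_sections text → Spec_strip_managed_dictation_ui_sections text (strip_managed_dictation_ui_sections text)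

-- ===== LEMMAS AND PROOFS =====

-- abstraction of B's state into A's state: committed output + current segment
def pvG (st : List (Option String × List String) × (Option String × List String)) :
    List String × Bool :=
  (stepB (st.1.foldl stepB []) st.2, pvManagedOpt st.2.1)

theorem step_comm (st : List (Option String × List String) × (Option String × List String))
    (l : String) : stepA (pvG st) l = pvG (stepS st l) := by
  rcases st with ⟨segs, hdr, ls⟩
  by_cases h : (PySem.Str.startswith (PySem.Str.strip l) "[" &&
      PySem.Str.endswith (PySem.Str.strip l) "]") = true
  · by_cases hm : pvManagedHeaders.contains (PySem.Str.strip l) = true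
    · simp only [stepA, stepS, pvG, stepB, pvManagedOpt, h, hm, if_true,
        List.foldl_append, List.foldl_cons, List.foldl_nil]
    · rw [Bool.not_eq_true] at hm
      simp only [stepA, stepS, pvG, stepB, pvManagedOpt, h, hm, if_true,
        Bool.false_eq_true, if_false,
        List.foldl_append, List.foldl_cons, List.foldl_nil]
  · rw [Bool.not_eq_true] at h
    cases hdr with
    | none =>
        simp only [stepA, stepS, pvG, stepB, pvManagedOpt, h,
          Bool.false_eq_true, if_false, List.append_assoc]
    | some s =>
        by_cases hm : pvManagedHeaders.contains s = true
        · simp only [stepA, stepS, pvG, stepB, pvManagedOpt, h, hm, if_true,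
            Bool.false_eq_true, if_false]
        · rw [Bool.not_eq_true] at hm
          simp only [stepA, stepS, pvG, stepB, pvManagedOpt, h, hm,
            Bool.false_eq_true, if_false, List.append_assoc]

theorem fold_comm (lines : List String)
    (st : List (Option String × List String) × (Option String × List String)) :
    lines.foldl stepA (pvG st) = pvG (lines.foldl stepS st) := by
  induction lines generalizing st with
  | nil => rfl
  | cons l rest ih => simp only [List.foldl_cons, step_comm, ih]

-- ===== VERDICT (by name: the statement is the Claim_ definition above) =====
theorem strip_managed_dictation_ui_sections_spec : Claim_equal_strip_managed_dictation_ui_sections := by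
  unfold Claim_equal_strip_managed_dictation_ui_sections
  intro text _
  unfold Spec_strip_managed_dictation_ui_sections
  unfold strip_managed_dictation_ui_sections strip_managed_dictation_ui_sections_alt
  have h0 : (([], false) : List String × Bool) = pvG ([], (none, [])) := by
    simp [pvG, stepB, pvManagedOpt]
  rw [h0, fold_comm]
  simp [pvG, List.foldl_append, stepB]
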